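-- pv_equiv track=rewrite | github.com/xaved88/bottled_ai | rs/ai/requested_scaling/handlers/synergy_handlers/synergy_card_reward_handler.py | delete_dict_keys_no_sinergy_and_requires_synergy
-- ===== SOURCE A (Python) =====
-- def delete_dict_keys_no_sinergy_and_requires_synergy(d, keys_to_delete):
--     for k in keys_to_delete:
--         if k in d and d[k] == 0:
--             del d[k]
--     if not d:
--         return {}
--     else:
--         return d
-- ===== SOURCE B (Python) =====
-- def delete_dict_keys_no_sinergy_and_requires_synergy(d, keys_to_delete):
--     targets = set(keys_to_delete)
--     return {k: v for k, v in d.items() if not (v == 0 and k in targets)}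
-- ===== Notes on version B (the rewrite author's own statement) =====
-- stated objective: idiomatic
-- what changed: Instead of iterating keys_to_delete and probing/mutating the dict per key, B builds a set of targets once and produces the result in a single dict comprehension over d's entries (no in-place mutation); return value is identical.
import Mathlib
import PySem

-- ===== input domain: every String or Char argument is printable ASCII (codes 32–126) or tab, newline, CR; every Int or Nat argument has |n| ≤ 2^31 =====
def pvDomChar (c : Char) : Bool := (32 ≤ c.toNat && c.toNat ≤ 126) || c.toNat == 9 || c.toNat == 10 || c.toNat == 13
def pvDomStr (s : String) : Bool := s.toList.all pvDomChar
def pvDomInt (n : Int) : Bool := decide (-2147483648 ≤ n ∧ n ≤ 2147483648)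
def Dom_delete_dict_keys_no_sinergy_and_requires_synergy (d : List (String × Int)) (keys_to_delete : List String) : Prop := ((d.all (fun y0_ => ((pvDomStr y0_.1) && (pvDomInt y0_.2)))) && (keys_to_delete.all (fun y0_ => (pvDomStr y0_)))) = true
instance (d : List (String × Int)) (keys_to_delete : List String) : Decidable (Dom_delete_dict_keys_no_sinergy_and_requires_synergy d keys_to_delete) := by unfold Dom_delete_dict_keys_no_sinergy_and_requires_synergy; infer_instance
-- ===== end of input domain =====

-- B replaces the per-key probe-and-delete loop (which mutates d in place) by a single
-- filtering pass over d's entries against a prebuilt set of target keys; the RETURN VALUE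
-- is identical (B does not mutate its argument, A does).


-- ===== PORT A =====
-- loop body of A: `if k in d and d[k] == 0: del d[k]` on the association list
def pvStepA (acc : List (String × Int)) (k : String) : List (String × Int) :=
  match acc.find? (fun p => p.1 == k) with
  | some p => if p.2 = 0 then acc.eraseP (fun q => q.1 == k) else acc
  | none => acc

def delete_dict_keys_no_sinergy_and_requires_synergy (d : List (String × Int)) (keys_to_delete : List String) : List (String × Int) :=
  let r := keys_to_delete.foldl pvStepA d
  if r.isEmpty then [] else r

-- ===== PORT B =====
def delete_dict_keys_no_sinergy_and_requires_synergy_alt (d : List (String × Int)) (keys_to_delete : List String) : List (String × Int) :=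
  let targets : PySem.Set String := PySem.Set.ofList keys_to_delete
  d.filter (fun p => !(p.2 == 0 && targets.contains p.1))

-- ===== PRECONDITION & SPEC =====
-- Pre_ excludes association lists with duplicate keys: those do not represent a Python
-- dict (A's input is a dict, which cannot hold duplicate keys).
def Pre_delete_dict_keys_no_sinergy_and_requires_synergy (d : List (String × Int)) (keys_to_delete : List String) : Prop :=
  (d.map Prod.fst).Nodup
instance (d : List (String × Int)) (keys_to_delete : List String) : Decidable (Pre_delete_dict_keys_no_sinergy_and_requires_synergy d keys_to_delete) := by unfold Pre_delete_dict_keys_no_sinergy_and_requires_synergy; infer_instance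

def pvWitness_delete_dict_keys_no_sinergy_and_requires_synergy : (List (String × Int)) × List String :=
  ([("a", 0), ("b", 1)], ["a", "c"])

def Spec_delete_dict_keys_no_sinergy_and_requires_synergy (d : List (String × Int)) (keys_to_delete : List String) (out : List (String × Int)) : Prop := out = delete_dict_keys_no_sinergy_and_requires_synergy_alt d keys_to_delete
instance (d : List (String × Int)) (keys_to_delete : List String) (out : List (String × Int)) : Decidable (Spec_delete_dict_keys_no_sinergy_and_requires_synergy d keys_to_delete out) := by unfold Spec_delete_dict_keys_no_sinergy_and_requires_synergy; infer_instance

-- ===== CLAIM (what is proved, stated in full; the proofs are below) =====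
def Claim_equal_delete_dict_keys_no_sinergy_and_requires_synergy : Prop := ∀ (d : List (String × Int)) (keys_to_delete : List String), Dom_delete_dict_keys_no_sinergy_and_requires_synergy d keys_to_delete → Pre_delete_dict_keys_no_sinergy_and_requires_synergy d keys_to_delete → Spec_delete_dict_keys_no_sinergy_and_requires_synergy d keys_to_delete (delete_dict_keys_no_sinergy_and_requires_synergy d keys_to_delete)

-- ===== LEMMAS AND PROOFS =====

-- one step of A's loop = filtering out the (unique) entry with key k and value 0
theorem pvStepA_eq_filter (k : String) (d : List (String × Int))
    (h : (d.map Prod.fst).Nodup) :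
    pvStepA d k = d.filter (fun p => !(p.2 == 0 && p.1 == k)) := by
  induction d with
  | nil => rfl
  | cons q t ih =>
    simp only [List.map_cons, List.nodup_cons, List.mem_map] at h
    obtain ⟨hq, ht⟩ := h
    by_cases hqk : (q.1 == k) = true
    · have hk' : q.1 = k := eq_of_beq hqk
      have htk : ∀ p ∈ t, (p.1 == k) = false := by
        intro p hp
        have hne : p.1 ≠ k := fun he => hq ⟨p, hp, by rw [he, hk']⟩
        simp [hne]
      have hft : t.filter (fun p => !(p.2 == 0 && p.1 == k)) = t :=
        List.filter_eq_self.mpr (fun p hp => by simp [htk p hp])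
      have hfq : List.find? (fun p : String × Int => p.1 == k) (q :: t) = some q := by
        simp [hqk]
      simp only [pvStepA, hfq]
      by_cases hv : q.2 = 0
      · rw [if_pos hv, List.eraseP_cons_of_pos (by simpa using hqk),
            List.filter_cons_of_neg (by simp [hqk, hv]), hft]
      · rw [if_neg hv, List.filter_cons_of_pos (by simp [hv]), hft]
    · have hqk' : (q.1 == k) = false := Bool.eq_false_iff.mpr hqk
      have hfq : List.find? (fun p : String × Int => p.1 == k) (q :: t)
          = List.find? (fun p : String × Int => p.1 == k) t := by
        simp [hqk']
      have hstep : pvStepA (q :: t) k = q :: pvStepA t k := by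
        simp only [pvStepA, hfq]
        cases hf : List.find? (fun p : String × Int => p.1 == k) t with
        | none => rfl
        | some p =>
          show (if p.2 = 0 then List.eraseP (fun q : String × Int => q.1 == k) (q :: t) else q :: t)
              = q :: (if p.2 = 0 then List.eraseP (fun q : String × Int => q.1 == k) t else t)
          by_cases hv : p.2 = 0
          · rw [if_pos hv, if_pos hv, List.eraseP_cons_of_neg (by simpa using hqk')]
          · rw [if_neg hv, if_neg hv]
      rw [hstep, List.filter_cons_of_pos (by simp [hqk']), ih ht]

-- filtering preserves distinctness of the keys
theorem pvFilter_nodup (f : String × Int → Bool) (d : List (String × Int))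
    (h : (d.map Prod.fst).Nodup) : ((d.filter f).map Prod.fst).Nodup :=
  (List.Sublist.map Prod.fst List.filter_sublist).nodup h

-- A's whole loop = one filter against membership in keys_to_delete
theorem pvLoop_eq_filter (keys : List String) (d : List (String × Int))
    (h : (d.map Prod.fst).Nodup) :
    keys.foldl pvStepA d = d.filter (fun p => !(p.2 == 0 && keys.contains p.1)) := by
  induction keys generalizing d with
  | nil => simp
  | cons k ks ih =>
    rw [List.foldl_cons, pvStepA_eq_filter k d h, ih _ (pvFilter_nodup _ d h),
        List.filter_filter]
    apply List.filter_congr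
    intro p _
    show ((!(p.2 == 0 && ks.contains p.1)) && (!(p.2 == 0 && p.1 == k)))
        = !(p.2 == 0 && (k :: ks).contains p.1)
    rw [List.contains_cons]
    cases p.2 == 0 <;> cases p.1 == k <;> cases ks.contains p.1 <;> rfl

theorem pvSetContains (keys : List String) (x : String) :
    (PySem.Set.ofList keys).contains x = keys.contains x := by
  show List.contains (PySem.Set.ofList keys) x = keys.contains x
  by_cases h : x ∈ keys
  · have h2 : x ∈ PySem.Set.ofList keys := (PySem.Set.mem_ofList _ _).mpr h
    rw [List.contains_iff_mem.mpr h, List.contains_iff_mem.mpr h2]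
  · have h2 : x ∉ PySem.Set.ofList keys := fun hc => h ((PySem.Set.mem_ofList _ _).mp hc)
    rw [Bool.eq_false_iff.mpr (fun hc => h2 (List.contains_iff_mem.mp hc)),
        Bool.eq_false_iff.mpr (fun hc => h (List.contains_iff_mem.mp hc))]

-- ===== VERDICT (by name: the statement is the Claim_ definition above) =====
theorem delete_dict_keys_no_sinergy_and_requires_synergy_spec : Claim_equal_delete_dict_keys_no_sinergy_and_requires_synergy := by
  intro d keys _ hpre
  unfold Spec_delete_dict_keys_no_sinergy_and_requires_synergy
  have halt : delete_dict_keys_no_sinergy_and_requires_synergy_alt d keys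
      = d.filter (fun p : String × Int => !(p.2 == 0 && keys.contains p.1)) := by
    show d.filter (fun p : String × Int => !(p.2 == 0 && (PySem.Set.ofList keys).contains p.1)) = _
    exact List.filter_congr fun p _ => by rw [pvSetContains]
  have hA : delete_dict_keys_no_sinergy_and_requires_synergy d keys
      = d.filter (fun p : String × Int => !(p.2 == 0 && keys.contains p.1)) := by
    show (if (keys.foldl pvStepA d).isEmpty then [] else keys.foldl pvStepA d) = _
    rw [pvLoop_eq_filter keys d hpre]
    by_cases hE : d.filter (fun p : String × Int => !(p.2 == 0 && keys.contains p.1)) = []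
    · simp [hE]
    · simp [List.isEmpty_eq_false_iff.mpr hE]
  exact hA.trans halt.symm
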